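-- pv_equiv track=rewrite | github.com/Wangzaizhanshen/UAV_Pursuit | UAV_Pursuit2.py | insert_number
-- ===== SOURCE A (Python) =====
-- def insert_number(arr, target):
--     left = 0
--     right = len(arr) - 1
--     insert_pos = len(arr)
--
--     while left <= right:
--         mid = (left + right) // 2
--
--         if target <= arr[mid]:
--             insert_pos = mid
--             right = mid - 1
--         else:
--             left = mid + 1
--
--     arr.insert(insert_pos, target)
--     arr.pop()  # 移除最后一个元素
--     return arr, insert_pos
-- ===== SOURCE B (Python) =====
-- def insert_number(arr, target):
--     # Windowed recursive binary search over (offset, size): no hi bound and no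
--     # insert_pos accumulator are kept; when the window is empty its offset is
--     # the leftmost insertion point.
--     def go(lo, size):
--         if size == 0:
--             return lo
--         half = (size - 1) // 2
--         mid = lo + half
--         if target <= arr[mid]:
--             return go(lo, half)
--         return go(mid + 1, size - half - 1)
--
--     n = len(arr)
--     pos = go(0, n)
--     # Rebuild by slicing and truncate to the original length (then write back,
--     # so the caller-visible mutation of arr matches A's insert+pop).
--     arr[:] = (arr[:pos] + [target] + arr[pos:])[:n]
--     return arr, pos
-- ===== Notes on version B (the rewrite author's own statement) =====
-- stated objective: alternative
-- what changed: Replaces A's while-loop over Int state (left, right, insert_pos) with a recursive binary search over an (offset, size) window -- no right bound and no insert_pos accumulator, the offset of the empty window is the answer -- and rebuilds the list by slice-and-truncate instead of in-place insert followed by pop.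
import Mathlib
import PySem

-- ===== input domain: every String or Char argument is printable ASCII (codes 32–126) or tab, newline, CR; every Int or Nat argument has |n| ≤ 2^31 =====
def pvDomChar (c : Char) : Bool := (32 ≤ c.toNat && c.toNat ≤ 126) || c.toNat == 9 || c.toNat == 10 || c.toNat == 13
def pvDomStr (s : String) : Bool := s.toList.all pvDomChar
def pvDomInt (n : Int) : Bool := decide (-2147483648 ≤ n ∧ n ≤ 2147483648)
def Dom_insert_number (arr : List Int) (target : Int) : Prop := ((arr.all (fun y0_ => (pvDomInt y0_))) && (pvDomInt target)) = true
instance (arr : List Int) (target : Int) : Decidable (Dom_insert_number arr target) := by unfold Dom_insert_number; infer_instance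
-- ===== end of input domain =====

-- B replaces A's while-loop over Int state (left, right, insert_pos) by a recursive
-- binary search over an (offset, size) window (no right bound, no accumulator) and
-- rebuilds the list by slice-and-truncate instead of in-place insert+pop; Python A
-- mutates arr in place and Python B writes the same final contents back via arr[:],
-- so the caller-visible mutation matches and this file is about the return value.

-- ===== PORT A =====
-- the while-loop of A: state (left, right, insert_pos); fuel = (right+1-left).toNat,
-- which strictly decreases each iteration, so the fuel is never exhausted.
def pvLoopAGo (arr : List Int) (target : Int) : Nat → Int → Int → Int → Int
  | 0, _, _, pos => pos
  | Nat.succ n, lo, hi, pos =>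
    if lo ≤ hi then
      let mid := PySem.Int.floordiv (lo + hi) 2
      if target ≤ (PySem.List.pyGet? arr mid).getD 0 then
        pvLoopAGo arr target n lo (mid - 1) mid
      else
        pvLoopAGo arr target n (mid + 1) hi pos
    else pos

def insert_number (arr : List Int) (target : Int) : List Int × Int :=
  let n : Int := (arr.length : Int)
  let insert_pos := pvLoopAGo arr target n.toNat 0 (n - 1) n
  let arr2 := PySem.List.insert arr insert_pos target
  -- arr.pop(): pop? never returns none here since arr2 is nonempty; getD [] is unreachable
  let arr3 := ((PySem.List.pop? arr2 (-1)).map (·.2)).getD []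
  (arr3, insert_pos)

-- ===== PORT B =====
-- B's windowed search go(lo, size); termination: the window size shrinks.
-- arr[mid]: for every window inside the array mid is in range, so List.getD is
-- exact here (the initial window 0..len(arr) only spawns sub-windows inside it).
def pvGoB (arr : List Int) (target : Int) : Nat → Nat → Nat
  | lo, 0 => lo
  | lo, Nat.succ k =>
      let half := k / 2
      let mid := lo + half
      if target ≤ arr.getD mid 0 then pvGoB arr target lo half
      else pvGoB arr target (mid + 1) (k - half)
  termination_by _ size => size
  decreasing_by all_goals omega

def insert_number_alt (arr : List Int) (target : Int) : List Int × Int :=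
  let pos := pvGoB arr target 0 arr.length
  -- (arr[:pos] + [target] + arr[pos:])[:n] — all bounds are nonnegative, so
  -- Python's slices are exactly take/drop/take here.
  ((arr.take pos ++ target :: arr.drop pos).take arr.length, (pos : Int))

-- ===== PRECONDITION & SPEC =====
def Spec_insert_number (arr : List Int) (target : Int) (out : List Int × Int) : Prop := out = insert_number_alt arr target
instance (arr : List Int) (target : Int) (out : List Int × Int) : Decidable (Spec_insert_number arr target out) := by unfold Spec_insert_number; infer_instance

-- ===== CLAIM (what is proved, stated in full; the proofs are below) =====
def Claim_equal_insert_number : Prop := ∀ (arr : List Int) (target : Int), Dom_insert_number arr target → Spec_insert_number arr target (insert_number arr target)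

-- ===== LEMMAS AND PROOFS =====

-- for a nonnegative index, A's pyGet?-with-default equals B's List.getD
theorem pvGetD_eq (arr : List Int) (i : Int) (h : 0 ≤ i) :
    (PySem.List.pyGet? arr i).getD 0 = arr.getD i.toNat 0 := by
  rw [PySem.List.pyGet?_of_nonneg arr h]
  simp [List.getD_eq_getElem?_getD]

-- A's loop with the invariant pos = hi + 1 computes exactly B's windowed search
-- (on reachable states 0 ≤ lo ≤ hi + 1 with enough fuel), within [lo, hi + 1].
theorem pvLoop_key (arr : List Int) (target : Int) : ∀ k : Nat, ∀ lo hi : Int,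
    0 ≤ lo → lo ≤ hi + 1 → (hi + 1 - lo).toNat ≤ k →
    pvLoopAGo arr target k lo hi (hi + 1)
      = ((pvGoB arr target lo.toNat (hi + 1 - lo).toNat : Nat) : Int) ∧
    lo ≤ pvLoopAGo arr target k lo hi (hi + 1) ∧
    pvLoopAGo arr target k lo hi (hi + 1) ≤ hi + 1 := by
  intro k
  induction k with
  | zero =>
      intro lo hi h0 hinv hfuel
      have hlo : lo = hi + 1 := by omega
      have hsz : (hi + 1 - lo).toNat = 0 := by omega
      simp only [pvLoopAGo, hsz, pvGoB]
      omega
  | succ n ih =>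
      intro lo hi h0 hinv hfuel
      by_cases hlh : lo ≤ hi
      · have hb := PySem.Int.floordiv_two_mid_bounds hlh
        set mid := PySem.Int.floordiv (lo + hi) 2 with hmid
        have hmede : mid = (lo + hi) / 2 := PySem.Int.floordiv_eq_ediv_of_pos (by omega)
        have hsz : (hi + 1 - lo).toNat = ((hi - lo).toNat) + 1 := by omega
        have hhalf : (hi - lo).toNat / 2 = (mid - lo).toNat := by omega
        have hmidn : lo.toNat + (mid - lo).toNat = mid.toNat := by omega
        simp only [pvLoopAGo, hlh, if_true, ← hmid, hsz, pvGoB, hhalf, hmidn]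
        rw [pvGetD_eq arr mid (by omega)]
        by_cases hc : target ≤ arr.getD mid.toNat 0
        · simp only [hc, if_true]
          have h := ih lo (mid - 1) h0 (by omega) (by omega)
          rw [show mid - 1 + 1 = mid from by omega] at h
          rw [show (mid - lo).toNat = (mid - 1 + 1 - lo).toNat from by omega] at *
          exact ⟨h.1, h.2.1, by omega⟩
        · simp only [hc, if_false]
          have h := ih (mid + 1) hi (by omega) (by omega) (by omega)
          have e1 : (mid + 1).toNat = mid.toNat + 1 := by omega
          have e2 : (hi + 1 - (mid + 1)).toNat = (hi - lo).toNat - (mid - lo).toNat := by omega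
          rw [e1, e2] at h
          exact ⟨h.1, by omega, h.2.2⟩
      · have hlo : lo = hi + 1 := by omega
        have hsz : (hi + 1 - lo).toNat = 0 := by omega
        simp only [pvLoopAGo, hlh, if_false, hsz, pvGoB]
        omega

-- ===== VERDICT (by name: the statement is the Claim_ definition above) =====
theorem insert_number_spec : Claim_equal_insert_number := by
  intro arr target _
  unfold Spec_insert_number insert_number insert_number_alt
  have hkey := pvLoop_key arr target ((arr.length : Int)).toNat 0 ((arr.length : Int) - 1)
      le_rfl (by omega) (by omega)
  rw [show (arr.length : Int) - 1 + 1 = (arr.length : Int) from by omega] at hkey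
  have hsz : ((arr.length : Int) - 0).toNat = arr.length := by omega
  rw [hsz, Int.toNat_zero] at hkey
  set p := pvGoB arr target 0 arr.length with hp
  have hloop := hkey.1
  have hpn : p ≤ arr.length := by omega
  simp only [hloop]
  rw [Prod.mk.injEq]
  refine ⟨?_, rfl⟩
  rw [PySem.List.insert_natCast arr p target hpn]
  set ys := arr.take p ++ target :: arr.drop p with hys
  have hne : ys ≠ [] := by simp [hys]
  have hlen : ys.length = arr.length + 1 := by simp [hys]
  have hpop : PySem.List.pop? ys = some (ys.getLast hne, ys.dropLast) := by
    conv_lhs => rw [← List.dropLast_append_getLast hne]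
    exact PySem.List.pop?_last _ _
  rw [hpop]
  simp only [Option.map_some, Option.getD_some]
  rw [List.dropLast_eq_take, hlen]
  simp
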